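-- pv_equiv track=rewrite | github.com/Saransh-cpp/releaseup | src/releaseit/extract.py | get_comments_and_docstrings
-- ===== SOURCE A (Python) =====
-- def get_comments_and_docstrings(preprocessed_additions: list[str]) -> list[str]:
--     """
--     Extracts comments and docstrings from preprocessed `git diff` output.
--
--     Args:
--         preprocessed_additions:
--             A list of preprocessed additions from `git diff`.
--
--     Returns:
--         extracted_docs:
--             Extracted comments and docstrings from the preprocessed_additions.
--     """
--     comments_and_docstrings = [
--         line[line.find("#") + 1 :].replace("\n", "").strip()
--         for line in preprocessed_additions
--         if "#" in line
--     ]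
--     lines = " ".join(preprocessed_additions).replace("\n", " ")
--     i = 0
--
--     while i < len(lines):
--         if lines[i : i + 3] == '"""':
--             idx_next_quotes = lines[i + 3 :].find('"""')
--             # args = lines[i + 3 :].find('Args:') if lines[i + 3 :].find('Args:') != -1 else sys.maxsize
--             # returns = lines[i + 3 :].find('Returns:') if lines[i + 3 :].find('Returns:') != -1 else sys.maxsize
--             # examples = lines[i + 3 :].find('Examples:') if lines[i + 3 :].find('Examples:') != -1 else sys.maxsize
--             # idx = min(args, returns, examples)
--             # if idx != sys.maxsize:
--             comments_and_docstrings.append(lines[i + 3 : i + idx_next_quotes + 3])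
--             i += idx_next_quotes + 6
--             continue
--         i += 1
--
--     extracted_docs = [x.strip() for x in comments_and_docstrings]
--     extracted_docs = [doc.replace("\n", "").replace("\t", "") for doc in extracted_docs]
--     extracted_docs = [f"{x.strip()}\n" for x in comments_and_docstrings]
--
--     i = 0
--     while i < len(extracted_docs):
--         line = extracted_docs[i]
--         if "noqa" in line or "type:" in line or line == "\n" or "todo" in line.lower():
--             extracted_docs.pop(i)
--         else:
--             i += 1
--
--     return extracted_docs
-- ===== SOURCE B (Python) =====
-- import re
--
--
-- def get_comments_and_docstrings(preprocessed_additions: list[str]) -> list[str]: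
--     """Extract comments and docstrings from preprocessed `git diff` additions.
--
--     Idiomatic re-implementation: the index-walking docstring scan is replaced
--     by a single non-greedy regular-expression pass, and the in-place pop loop
--     by a filtering comprehension.
--     """
--     comments_and_docstrings = [
--         line[line.find("#") + 1 :].replace("\n", "").strip()
--         for line in preprocessed_additions
--         if "#" in line
--     ]
--     lines = " ".join(preprocessed_additions).replace("\n", " ")
--     for doc in re.findall(r'"""(.*?)"""', lines):
--         comments_and_docstrings.append(doc)
--
--     return [
--         line
--         for line in (f"{x.strip()}\n" for x in comments_and_docstrings)
--         if not (
--             "noqa" in line or "type:" in line or line == "\n" or "todo" in line.lower()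
--         )
--     ]
-- ===== Notes on version B (the rewrite author's own statement) =====
-- stated objective: idiomatic
-- what changed: The character-by-character index-walking while loop that scans for triple-quoted docstrings is replaced by a single non-greedy regex findall pass (C-level scan instead of a per-character Python loop), and the in-place pop(i) filtering loop plus two dead intermediate lists are replaced by one filtering comprehension.
import Mathlib
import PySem

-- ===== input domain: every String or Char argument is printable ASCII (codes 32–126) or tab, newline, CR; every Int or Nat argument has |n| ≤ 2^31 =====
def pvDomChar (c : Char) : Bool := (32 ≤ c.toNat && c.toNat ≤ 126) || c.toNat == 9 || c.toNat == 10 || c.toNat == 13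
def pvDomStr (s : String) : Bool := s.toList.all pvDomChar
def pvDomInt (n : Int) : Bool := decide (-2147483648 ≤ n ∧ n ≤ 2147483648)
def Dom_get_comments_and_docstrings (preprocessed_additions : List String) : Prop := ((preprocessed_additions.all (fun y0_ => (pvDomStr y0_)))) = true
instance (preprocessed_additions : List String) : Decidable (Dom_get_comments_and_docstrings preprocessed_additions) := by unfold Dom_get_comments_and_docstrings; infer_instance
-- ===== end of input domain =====

-- B replaces A's index-walking docstring scan by a single non-greedy find/capture pass
-- (the Lean port of Python B's re.findall(r'"""(.*?)"""', …)) and A's in-place pop loop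
-- by a filtering comprehension; objective: idiomatic, same observable results.

-- Shared helpers: BOTH Python versions contain literally this comment comprehension,
-- the `" ".join(...).replace("\n", " ")` line and the filtering condition.
def pvQQQ : List Char := ['"', '"', '"']

-- [line[line.find("#") + 1:].replace("\n", "").strip() for line in xs if "#" in line]
def pvComments (xs : List String) : List (List Char) :=
  xs.filterMap (fun line =>
    let cs := line.toList
    if PySem.Chars.isIn ['#'] cs then
      some (PySem.Chars.strip
        (PySem.Chars.replace
          (PySem.List.slice cs (some (PySem.Chars.find cs ['#'] + 1)) none) ['\n'] []))
    else none)

-- " ".join(xs).replace("\n", " ")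
def pvLines (xs : List String) : List Char :=
  PySem.Chars.replace (PySem.Chars.join [' '] (xs.map String.toList)) ['\n'] [' ']

-- "noqa" in line or "type:" in line or line == "\n" or "todo" in line.lower()
def pvBad (x : List Char) : Bool :=
  PySem.Chars.isIn "noqa".toList x || PySem.Chars.isIn "type:".toList x ||
    x == ['\n'] || PySem.Chars.isIn "todo".toList (PySem.Chars.lower x)

-- ===== PORT A =====
-- A's while loop: i walks the string one character at a time; on '"""' it finds the
-- next '"""' (-1 if absent), appends the slice lines[i+3 : i+idx+3] and jumps to
-- i+idx+6.  (i + (idx+6).toNat equals Python's i + idx + 6 because idx ≥ -1.)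
def pvScanA (cs : List Char) (i : Nat) (acc : List (List Char)) : List (List Char) :=
  if _h : i < cs.length then
    if PySem.List.slice cs (some (i : Int)) (some ((i : Int) + 3)) = pvQQQ then
      let idx := PySem.Chars.find (cs.drop (i + 3)) pvQQQ
      pvScanA cs (i + (idx + 6).toNat)
        (acc ++ [PySem.List.slice cs (some ((i : Int) + 3)) (some ((i : Int) + idx + 3))])
    else pvScanA cs (i + 1) acc
  else acc
termination_by cs.length - i
decreasing_by
  · have := PySem.Chars.neg_one_le_find (cs.drop (i + 3)) pvQQQ
    omega
  · omega

-- A's in-place filtering: while i < len: pop(i) if flagged else i += 1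
def pvPopLoop (xs : List (List Char)) : List (List Char) :=
  match xs with
  | [] => []
  | x :: rest => if pvBad x then pvPopLoop rest else x :: pvPopLoop rest

def get_comments_and_docstrings (preprocessed_additions : List String) : List String :=
  let comments := pvComments preprocessed_additions
  let lines := pvLines preprocessed_additions
  let cad := pvScanA lines 0 comments
  -- the two intermediate lists A builds and then overwrites (kept, unused, as in A)
  let _extracted₁ := cad.map (fun x => PySem.Chars.strip x)
  let _extracted₂ := _extracted₁.map
    (fun d => PySem.Chars.replace (PySem.Chars.replace d ['\n'] []) ['\t'] [])
  let extracted := cad.map (fun x => PySem.Chars.strip x ++ ['\n'])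
  (pvPopLoop extracted).map String.ofList

-- ===== PORT B =====
-- re.findall(r'"""(.*?)"""', cs): leftmost opening '"""', shortest close, resume
-- after the close; no match (hence no capture) when the opening is unterminated.
def pvFindall (cs : List Char) : List (List Char) :=
  let j := PySem.Chars.find cs pvQQQ
  if hj : j = -1 then []
  else
    let rest := cs.drop (j.toNat + 3)
    let k := PySem.Chars.find rest pvQQQ
    if k = -1 then []
    else rest.take k.toNat :: pvFindall (rest.drop (k.toNat + 3))
termination_by cs.length
decreasing_by
  have h3 : pvQQQ <:+: cs := (PySem.Chars.find_ne_neg_one_iff cs pvQQQ).mp hj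
  have hlen : 3 ≤ cs.length := by simpa [pvQQQ] using h3.length_le
  simp only [List.length_drop]
  omega

def get_comments_and_docstrings_alt (preprocessed_additions : List String) : List String :=
  let cad := pvComments preprocessed_additions ++ pvFindall (pvLines preprocessed_additions)
  ((cad.map (fun x => PySem.Chars.strip x ++ ['\n'])).filter
    (fun line => !pvBad line)).map String.ofList

-- ===== PRECONDITION & SPEC =====
def Spec_get_comments_and_docstrings (preprocessed_additions : List String) (out : List String) : Prop := out = get_comments_and_docstrings_alt preprocessed_additions
instance (preprocessed_additions : List String) (out : List String) : Decidable (Spec_get_comments_and_docstrings preprocessed_additions out) := by unfold Spec_get_comments_and_docstrings; infer_instance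

-- ===== CLAIM (what is proved, stated in full; the proofs are below) =====
def Claim_equal_get_comments_and_docstrings : Prop := ∀ (preprocessed_additions : List String), Dom_get_comments_and_docstrings preprocessed_additions → Spec_get_comments_and_docstrings preprocessed_additions (get_comments_and_docstrings preprocessed_additions)

-- ===== LEMMAS AND PROOFS =====

-- A's scan, expressed on the suffix it still has to read: like pvFindall, except that
-- an unterminated opening '"""' appends the empty capture (Python's lines[i+3:i+2]).
def pvGB (cs : List Char) : List (List Char) :=
  let j := PySem.Chars.find cs pvQQQ
  if hj : j = -1 then []
  else
    let rest := cs.drop (j.toNat + 3)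
    let k := PySem.Chars.find rest pvQQQ
    if k = -1 then [[]]
    else rest.take k.toNat :: pvGB (rest.drop (k.toNat + 3))
termination_by cs.length
decreasing_by
  have h3 : pvQQQ <:+: cs := (PySem.Chars.find_ne_neg_one_iff cs pvQQQ).mp hj
  have hlen : 3 ≤ cs.length := by simpa [pvQQQ] using h3.length_le
  simp only [List.length_drop]
  omega

theorem pvFind_eq_nat (cs sub : List Char) (n : Nat)
    (h1 : sub <+: cs.drop n) (h2 : ∀ m < n, ¬ sub <+: cs.drop m) :
    PySem.Chars.find cs sub = (n : Int) := by
  have hinf : sub <:+: cs := h1.isInfix.trans (cs.drop_suffix n).isInfix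
  have hnn : 0 ≤ PySem.Chars.find cs sub := (PySem.Chars.find_nonneg_iff cs sub).mpr hinf
  obtain ⟨hp, hmin⟩ := PySem.Chars.find_spec hnn
  have h1' : ¬ (PySem.Chars.find cs sub).toNat < n := fun hlt => h2 _ hlt hp
  have h2' : ¬ n < (PySem.Chars.find cs sub).toNat := fun hlt => hmin n hlt h1
  omega

-- the condition A's scan tests, as a prefix fact about the suffix still to read
theorem pvSlice_take (cs : List Char) (i : Nat) :
    PySem.List.slice cs (some (i : Int)) (some ((i : Int) + 3)) = (cs.drop i).take 3 := by
  simpa using PySem.List.slice_natCast_add cs i 3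

theorem pvTake3_prefix {s : List Char} (h : s.take 3 = pvQQQ) : pvQQQ <+: s :=
  h ▸ s.take_prefix 3

theorem pvNoInfix_noPrefix {s : List Char} (h : PySem.Chars.find s pvQQQ = -1) :
    ∀ j, ¬ pvQQQ <+: s.drop j := by
  intro j hpre
  exact (PySem.Chars.find_eq_neg_one_iff s pvQQQ).mp h
    (hpre.isInfix.trans (s.drop_suffix j).isInfix)

-- when no '"""' starts at or after position m, the scan appends nothing
theorem pvScanA_noMatch (cs : List Char) (m : Nat)
    (h : ∀ j, m ≤ j → ¬ pvQQQ <+: cs.drop j) :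
    ∀ i acc, m ≤ i → pvScanA cs i acc = acc := by
  have H : ∀ d i acc, cs.length - i ≤ d → m ≤ i → pvScanA cs i acc = acc := by
    intro d
    induction d with
    | zero =>
      intro i acc hd hm
      rw [pvScanA]
      have : ¬ i < cs.length := by omega
      simp [this]
    | succ d ih =>
      intro i acc hd hm
      rw [pvScanA]
      split
      · have hcond : ¬ PySem.List.slice cs (some (i : Int)) (some ((i : Int) + 3)) = pvQQQ := by
          rw [pvSlice_take]
          intro hc
          exact h i hm (pvTake3_prefix hc)
        rw [if_neg hcond]
        exact ih (i + 1) acc (by omega) (by omega)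
      · rfl
  exact fun i acc hm => H (cs.length - i) i acc le_rfl hm

-- stepping over a character that does not open a docstring does not change the matches
theorem pvGB_tail (s : List Char) (h : ¬ pvQQQ <+: s) : pvGB s = pvGB s.tail := by
  by_cases hj : PySem.Chars.find s pvQQQ = -1
  · have hti : PySem.Chars.find s.tail pvQQQ = -1 := by
      rw [PySem.Chars.find_eq_neg_one_iff] at *
      exact fun hin => hj (hin.trans s.tail_suffix.isInfix)
    rw [pvGB, pvGB]
    simp [hj, hti]
  · have hnn : 0 ≤ PySem.Chars.find s pvQQQ := by
      have := PySem.Chars.neg_one_le_find s pvQQQ; omega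
    obtain ⟨hp, hmin⟩ := PySem.Chars.find_spec hnn
    set n := (PySem.Chars.find s pvQQQ).toNat with hn
    have hn1 : 1 ≤ n := by
      rcases Nat.eq_zero_or_pos n with h0 | h1
      · exact absurd (by simpa [h0] using hp) h
      · exact h1
    have hfs : PySem.Chars.find s pvQQQ = (n : Int) := by omega
    have hdt : ∀ m : Nat, s.tail.drop m = s.drop (m + 1) := by
      intro m; rw [← List.drop_one, List.drop_drop, Nat.add_comm]
    have hft : PySem.Chars.find s.tail pvQQQ = ((n - 1 : Nat) : Int) := by
      apply pvFind_eq_nat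
      · rw [hdt]; simpa [Nat.sub_add_cancel hn1] using hp
      · intro m hm; rw [hdt]; exact hmin (m + 1) (by omega)
    have hrest : s.tail.drop ((n - 1) + 3) = s.drop (n + 3) := by
      rw [hdt]; congr 1; omega
    rw [pvGB]
    conv_rhs => rw [pvGB]
    simp only [hfs, hft]
    have hne : ¬ ((n : Int) = -1) := by omega
    have hne' : ¬ (((n - 1 : Nat) : Int) = -1) := by omega
    simp only [dif_neg hne, dif_neg hne', Int.toNat_natCast, hrest]

theorem pvScanA_eq_gB (cs : List Char) :
    ∀ i acc, pvScanA cs i acc = acc ++ pvGB (cs.drop i) := by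
  have H : ∀ d i acc, cs.length - i ≤ d → pvScanA cs i acc = acc ++ pvGB (cs.drop i) := by
    intro d
    induction d with
    | zero =>
      intro i acc hd
      have hlen : cs.length ≤ i := by omega
      have hnil : cs.drop i = [] := List.drop_eq_nil_of_le hlen
      rw [pvScanA]
      have : ¬ i < cs.length := by omega
      simp [this, hnil, pvGB, show PySem.Chars.find ([] : List Char) pvQQQ = -1 from by decide]
    | succ d ih =>
      intro i acc hd
      rw [pvScanA]
      by_cases hlt : i < cs.length
      · rw [dif_pos hlt]
        by_cases hcond : PySem.List.slice cs (some (i : Int)) (some ((i : Int) + 3)) = pvQQQ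
        · rw [if_pos hcond]
          have hpre : pvQQQ <+: cs.drop i := pvTake3_prefix (by rw [← pvSlice_take]; exact hcond)
          have hj0 : PySem.Chars.find (cs.drop i) pvQQQ = 0 := by
            simpa using pvFind_eq_nat (cs.drop i) pvQQQ 0 (by simpa using hpre) (by omega)
          have hrw : (cs.drop i).drop 3 = cs.drop (i + 3) := by
            rw [List.drop_drop]
          by_cases hk : PySem.Chars.find (cs.drop (i + 3)) pvQQQ = -1
          · -- unterminated: A appends the empty slice and never matches again
            have hsl : PySem.List.slice cs (some ((i : Int) + 3))
                (some ((i : Int) + PySem.Chars.find (cs.drop (i + 3)) pvQQQ + 3)) = [] := by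
              rw [hk]
              have h3 : ((i : Int) + 3) = ((i + 3 : Nat) : Int) := by push_cast; ring
              have h2 : ((i : Int) + -1 + 3) = ((i + 2 : Nat) : Int) := by push_cast; ring
              rw [h3, h2, PySem.List.slice_natCast]
              simp [Nat.sub_eq_zero_of_le]
            have hstep : (PySem.Chars.find (cs.drop (i + 3)) pvQQQ + 6).toNat = 5 := by
              rw [hk]; rfl
            have hnm : pvScanA cs (i + 5) (acc ++ [[]]) = acc ++ [[]] := by
              refine pvScanA_noMatch cs (i + 3) ?_ (i + 5) (acc ++ [[]]) (by omega)
              intro j hj hp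
              have hdj : cs.drop j = (cs.drop (i + 3)).drop (j - (i + 3)) := by
                rw [List.drop_drop]; congr 1; omega
              exact pvNoInfix_noPrefix hk (j - (i + 3)) (hdj ▸ hp)
            simp only [hsl, hstep, hnm]
            rw [pvGB]
            simp [hj0, hrw, hk]
          · have hk0 : 0 ≤ PySem.Chars.find (cs.drop (i + 3)) pvQQQ := by
              have := PySem.Chars.neg_one_le_find (cs.drop (i + 3)) pvQQQ; omega
            set k := PySem.Chars.find (cs.drop (i + 3)) pvQQQ with hkdef
            have hsl : PySem.List.slice cs (some ((i : Int) + 3)) (some ((i : Int) + k + 3)) =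
                (cs.drop (i + 3)).take k.toNat := by
              have h3 : ((i : Int) + 3) = ((i + 3 : Nat) : Int) := by push_cast; ring
              have hb : ((i : Int) + k + 3) = ((i + k.toNat + 3 : Nat) : Int) := by
                push_cast [Int.toNat_of_nonneg hk0]; ring
              rw [h3, hb, PySem.List.slice_natCast]
              congr 1; omega
            have hstep : i + (k + 6).toNat = i + (k.toNat + 6) := by omega
            have hdrop : cs.drop (i + (k.toNat + 6)) = (cs.drop (i + 3)).drop (k.toNat + 3) := by
              rw [List.drop_drop]; congr 1; omega
            simp only [hsl, hstep]
            rw [ih (i + (k.toNat + 6)) (acc ++ [(cs.drop (i + 3)).take k.toNat]) (by omega), hdrop]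
            conv_rhs => rw [pvGB]
            have harith : i + 3 + (k.toNat + 3) = k.toNat + 3 + (i + 3) := by omega
            simp [hj0, hrw, ← hkdef, hk, List.drop_drop, harith]
        · rw [if_neg hcond]
          rw [ih (i + 1) acc (by omega)]
          have ht : cs.drop (i + 1) = (cs.drop i).tail := by
            rw [← List.drop_one, List.drop_drop]
          rw [ht, ← pvGB_tail]
          rw [pvSlice_take] at hcond
          exact fun hpre => hcond (List.prefix_iff_eq_take.mp hpre).symm
      · rw [dif_neg hlt]
        have hnil : cs.drop i = [] := List.drop_eq_nil_of_le (by omega)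
        simp [hnil, pvGB, show PySem.Chars.find ([] : List Char) pvQQQ = -1 from by decide]
  exact fun i acc => H (cs.length - i) i acc le_rfl

theorem pvGB_eq_findall (cs : List Char) :
    pvGB cs = pvFindall cs ∨ pvGB cs = pvFindall cs ++ [[]] := by
  have H : ∀ d cs, List.length cs ≤ d →
      (pvGB cs = pvFindall cs ∨ pvGB cs = pvFindall cs ++ [[]]) := by
    intro d
    induction d with
    | zero =>
      intro cs hd
      have hnil : cs = [] := List.eq_nil_of_length_eq_zero (by omega)
      subst hnil
      rw [pvGB, pvFindall]
      simp [show PySem.Chars.find ([] : List Char) pvQQQ = -1 from by decide]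
    | succ d ih =>
      intro cs hd
      rw [pvGB, pvFindall]
      by_cases hj : PySem.Chars.find cs pvQQQ = -1
      · simp [hj]
      · simp only [dif_neg hj]
        by_cases hk : PySem.Chars.find
            (cs.drop ((PySem.Chars.find cs pvQQQ).toNat + 3)) pvQQQ = -1
        · simp [hk]
        · simp only [if_neg hk]
          have harg : ((cs.drop ((PySem.Chars.find cs pvQQQ).toNat + 3)).drop
              ((PySem.Chars.find (cs.drop ((PySem.Chars.find cs pvQQQ).toNat + 3)) pvQQQ).toNat
                + 3)).length ≤ d := by
            simp only [List.length_drop]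
            omega
          rcases ih _ harg with h | h
          · left; rw [h]
          · right; rw [h]; simp
  exact H cs.length cs le_rfl

theorem pvPopLoop_eq_filter (xs : List (List Char)) :
    pvPopLoop xs = xs.filter (fun x => !pvBad x) := by
  induction xs with
  | nil => rfl
  | cons x rest ih => by_cases h : pvBad x <;> simp [pvPopLoop, List.filter, h, ih]

-- ===== VERDICT (by name: the statement is the Claim_ definition above) =====
theorem get_comments_and_docstrings_spec : Claim_equal_get_comments_and_docstrings := by
  intro xs _hdom
  unfold Spec_get_comments_and_docstrings
  unfold get_comments_and_docstrings get_comments_and_docstrings_alt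
  simp only [pvPopLoop_eq_filter, pvScanA_eq_gB (pvLines xs) 0 (pvComments xs), List.drop_zero]
  rcases pvGB_eq_findall (pvLines xs) with h | h <;>
    simp [h, List.map_append, List.filter_append, pvBad,
      show PySem.Chars.strip ([] : List Char) = [] from by decide]
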